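-- pv_equiv track=rewrite | github.com/Krevitzz/prc_framework | prc/analysing/outliers_lite.py | _extract_common_features
-- ===== SOURCE A (Python) =====
-- from typing import Dict, List, Tuple, Set
--
-- def _extract_common_features(rows: List[Dict]) -> Set[str]:
--     """
--     Identifie features présentes dans TOUS les runs.
--
--     Args:
--         rows : Liste {composition, features}
--
--     Returns:
--         Set features communes (intersection)
--
--     Notes:
--         - Exclut features non numériques (has_*, is_*)
--         - Retourne intersection stricte (présent partout)
--     """
--     if len(rows) == 0:
--         return set()
--
--     common = set(rows[0]['features'].keys())
--
--     for row in rows[1:]: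
--         common &= set(row['features'].keys())
--
--     # Filtrer flags booléens
--     common = {
--         k for k in common
--         if not k.startswith('has_') and not k.startswith('is_')
--     }
--
--     return common
-- ===== SOURCE B (Python) =====
-- def _extract_common_features(rows):
--     """Single pass: tally each feature key once per row, then keep keys whose
--     tally equals len(rows) (present in every row) and that are not flag keys."""
--     n = len(rows)
--     if n == 0:
--         return set()
--     counts = {}
--     for row in rows:
--         for k in row['features']:
--             counts[k] = counts.get(k, 0) + 1
--     return {k for k, c in counts.items()
--             if c == n and not k.startswith('has_') and not k.startswith('is_')}
-- ===== Notes on version B (the rewrite author's own statement) =====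
-- stated objective: alternative
-- what changed: Replaces the running set-intersection over rows (seed set from row 0, '&=' per further row, then a filtering comprehension) with a single-pass key tally in a dict followed by selecting keys whose count equals len(rows) and are not 'has_'/'is_' flags.
import Mathlib
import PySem

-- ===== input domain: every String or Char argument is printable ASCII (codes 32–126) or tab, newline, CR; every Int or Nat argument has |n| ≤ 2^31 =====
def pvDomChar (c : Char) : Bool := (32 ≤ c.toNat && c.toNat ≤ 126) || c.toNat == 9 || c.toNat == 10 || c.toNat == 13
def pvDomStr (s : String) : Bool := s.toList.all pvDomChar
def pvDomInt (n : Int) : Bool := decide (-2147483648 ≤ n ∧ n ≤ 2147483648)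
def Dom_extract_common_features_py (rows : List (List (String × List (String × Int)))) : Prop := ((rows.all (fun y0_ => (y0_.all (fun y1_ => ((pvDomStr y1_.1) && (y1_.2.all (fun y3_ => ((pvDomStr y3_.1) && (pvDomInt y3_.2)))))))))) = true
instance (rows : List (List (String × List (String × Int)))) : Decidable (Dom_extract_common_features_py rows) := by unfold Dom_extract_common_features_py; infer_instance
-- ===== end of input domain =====

-- B replaces A's running set-intersection by a one-pass per-row key tally plus a
-- count == len(rows) selection; same result, similar cost (objective: alternative).
-- Both programs only read their argument (no mutation).

-- ===== PORT A =====
-- shared by both ports: keys of row['features'] (a dict lookup); the KeyError case (no 'features' key) is excluded by Pre_,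
-- here getD returns [] which is never relied upon inside Pre_.
def featKeys (row : List (String × List (String × Int))) : List String :=
  PySem.Dict.keys (PySem.Dict.ofList (PySem.Dict.getD (PySem.Dict.ofList row) "features" []))

def extract_common_features_py (rows : List (List (String × List (String × Int)))) : List String :=
  match rows with
  | [] => []                                     -- if len(rows) == 0: return set()
  | r0 :: rest =>
    -- common = set(rows[0]['features'].keys()); for row in rows[1:]: common &= set(...)
    let common : PySem.Set String :=
      rest.foldl (fun c row => PySem.Set.inter c (PySem.Set.ofList (featKeys row)))
        (PySem.Set.ofList (featKeys r0))
    -- {k for k in common if not k.startswith('has_') and not k.startswith('is_')}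
    PySem.Set.ofList (common.filter (fun k =>
      !(PySem.Str.startswith k "has_") && !(PySem.Str.startswith k "is_")))

-- ===== PORT B =====
def extract_common_features_py_alt (rows : List (List (String × List (String × Int)))) : List String :=
  let n := rows.length
  if n = 0 then []
  else
    -- counts[k] = counts.get(k, 0) + 1 over every key of every row
    let counts : PySem.Dict String Int :=
      rows.foldl (fun d row => (featKeys row).foldl (fun d k => d.modify k 0 (· + 1)) d)
        PySem.Dict.empty
    -- {k for k, c in counts.items() if c == n and not k.startswith('has_') and not k.startswith('is_')}
    PySem.Set.ofList ((counts.items.filter (fun p =>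
      p.2 == (n : Int) && !(PySem.Str.startswith p.1 "has_") && !(PySem.Str.startswith p.1 "is_"))).map (·.1))

-- ===== PRECONDITION & SPEC =====
-- Pre_ excludes exactly the rows without a 'features' key, on which Python A raises KeyError.
def Pre_extract_common_features_py (rows : List (List (String × List (String × Int)))) : Prop :=
  ∀ row ∈ rows, "features" ∈ row.map Prod.fst
instance (rows : List (List (String × List (String × Int)))) : Decidable (Pre_extract_common_features_py rows) := by unfold Pre_extract_common_features_py; infer_instance

def pvWitness_extract_common_features_py : (List (List (String × List (String × Int)))) :=
  ([[("features", [("a", 1), ("has_b", 2)])], [("features", [("a", 3)])]])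

def Spec_extract_common_features_py (rows : List (List (String × List (String × Int)))) (out : List String) : Prop := out = extract_common_features_py_alt rows
instance (rows : List (List (String × List (String × Int)))) (out : List String) : Decidable (Spec_extract_common_features_py rows out) := by unfold Spec_extract_common_features_py; infer_instance

-- ===== CLAIM (what is proved, stated in full; the proofs are below) =====
def Claim_equal_extract_common_features_py : Prop := ∀ (rows : List (List (String × List (String × Int)))), Dom_extract_common_features_py rows → Pre_extract_common_features_py rows → Spec_extract_common_features_py rows (extract_common_features_py rows)

-- ===== LEMMAS AND PROOFS =====

theorem nodup_featKeys (row : List (String × List (String × Int))) :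
    (featKeys row).Nodup := PySem.Dict.nodup_keys_ofList _

theorem ofList_featKeys (row : List (String × List (String × Int))) :
    PySem.Set.ofList (featKeys row) = featKeys row :=
  PySem.Set.ofList_eq_self_of_nodup _ (nodup_featKeys row)


-- A's intersection loop is a filter by membership in every later row
theorem foldA (rest : List (List (String × List (String × Int)))) (c : List String) :
    rest.foldl (fun c row => PySem.Set.inter c (PySem.Set.ofList (featKeys row))) c
      = c.filter (fun k => rest.all (fun row => decide (k ∈ featKeys row))) := by
  induction rest generalizing c with
  | nil => simp
  | cons r rs ih =>
    rw [List.foldl_cons, ih, ofList_featKeys]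
    show ((PySem.Set.inter c (featKeys r)).filter _) = _
    simp only [PySem.Set.inter, List.filter_filter]
    apply List.filter_congr
    intro k _
    rw [Bool.eq_iff_iff]
    simp [PySem.Set.contains_eq_listContains, and_comm]

-- B's nested tally loop is the tally of the concatenation of all key lists
theorem foldB (rows : List (List (String × List (String × Int)))) (e : PySem.Dict String Int) :
    rows.foldl (fun d row => (featKeys row).foldl (fun d k => d.modify k 0 (· + 1)) d) e
      = (rows.flatMap featKeys).foldl (fun d k => d.modify k 0 (· + 1)) e := by
  induction rows generalizing e with
  | nil => simp
  | cons r rs ih =>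
    rw [List.foldl_cons, ih, List.flatMap_cons, List.foldl_append]

-- the tally of a row block is at most its number of rows, with equality iff the key is everywhere
theorem count_flat (rs : List (List (String × List (String × Int)))) (k : String) :
    (rs.flatMap featKeys).count k ≤ rs.length ∧
      ((rs.flatMap featKeys).count k = rs.length ↔ ∀ r ∈ rs, k ∈ featKeys r) := by
  induction rs with
  | nil => simp
  | cons r rs ih =>
    rw [List.flatMap_cons, List.count_append, List.length_cons]
    by_cases h : k ∈ featKeys r
    · rw [List.count_eq_one_of_mem (nodup_featKeys r) h]
      refine ⟨by omega, ?_, ?_⟩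
      · intro he r' hr'
        rcases List.mem_cons.mp hr' with rfl | h2
        · exact h
        · exact (ih.2.1 (by omega)) r' h2
      · intro hall
        have := ih.2.2 (fun r' hr' => hall r' (List.mem_cons_of_mem _ hr'))
        omega
    · rw [List.count_eq_zero_of_not_mem h]
      refine ⟨by omega, ?_, ?_⟩
      · intro he
        exact absurd (he ▸ (by omega : rs.length < rs.length + 1)) (by simpa using ih.1)
      · intro hall
        exact absurd (hall r (List.mem_cons_self)) h

-- a dedup-in-order extension by keys never satisfying P (outside s) does not change the filter
theorem filter_foldl_add (L : List String) (s : List String) (P : String → Bool)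
    (hnd : s.Nodup) (h : ∀ k ∈ L, P k = true → k ∈ s) :
    (L.foldl PySem.Set.add s).filter P = s.filter P := by
  induction L generalizing s with
  | nil => simp
  | cons x L ih =>
    simp only [List.foldl_cons]
    by_cases hx : x ∈ s
    · rw [show PySem.Set.add s x = s by
        simp [PySem.Set.add, PySem.Set.contains_eq_listContains, hx]]
      exact ih s hnd (fun k hk => h k (List.mem_cons_of_mem _ hk))
    · have hadd : PySem.Set.add s x = s ++ [x] := by
        simp only [PySem.Set.add, PySem.Set.contains_eq_listContains]
        rw [if_neg (by simpa using hx)]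
      rw [hadd]
      have hPx : P x = false := by
        by_contra hPx
        exact hx (h x (List.mem_cons_self) (by simpa using hPx))
      rw [ih (s ++ [x]) (by simp [List.nodup_append, hnd]; intro a ha hax; exact hx (hax ▸ ha))
          (fun k hk hPk => List.mem_append_left _ (h k (List.mem_cons_of_mem _ hk) hPk))]
      simp [List.filter_append, hPx]

theorem ofList_append_foldl (s L : List String) (hnd : s.Nodup) :
    PySem.Set.ofList (s ++ L) = L.foldl PySem.Set.add s := by
  rw [PySem.Set.ofList_eq_foldl, List.foldl_append]
  congr 1
  rw [← PySem.Set.ofList_eq_foldl, PySem.Set.ofList_eq_self_of_nodup _ hnd]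

-- ===== VERDICT (by name: the statement is the Claim_ definition above) =====
theorem extract_common_features_py_spec : Claim_equal_extract_common_features_py := by
  intro rows _ _
  unfold Spec_extract_common_features_py
  match rows with
  | [] => rfl
  | r0 :: rest =>
    simp only [extract_common_features_py, extract_common_features_py_alt]
    rw [foldA, ofList_featKeys, List.filter_filter]
    rw [if_neg (by simp)]
    rw [foldB, ← PySem.Dict.counter_eq_foldl, PySem.Dict.items_counter, List.filter_map,
      List.map_map, List.flatMap_cons, ofList_append_foldl _ _ (nodup_featKeys r0)]
    simp only [Function.comp_def, List.length_cons, List.map_id']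
    have hQmem : ∀ k ∈ List.flatMap featKeys rest,
        (((((featKeys r0 ++ List.flatMap featKeys rest).count k : Int) ==
            ((rest.length + 1 : Nat) : Int)) && !PySem.Str.startswith k "has_") &&
          !PySem.Str.startswith k "is_") = true → k ∈ featKeys r0 := by
      intro k _ hQ
      by_contra hk0
      have h1 := (count_flat rest k).1
      have h2 : (featKeys r0 ++ List.flatMap featKeys rest).count k
          = (List.flatMap featKeys rest).count k := by
        rw [List.count_append, List.count_eq_zero_of_not_mem hk0]
        omega
      simp only [Bool.and_eq_true, beq_iff_eq] at hQ
      have h3 := hQ.1.1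
      rw [h2] at h3
      have h4 : (List.flatMap featKeys rest).count k = rest.length + 1 := by exact_mod_cast h3
      omega
    rw [filter_foldl_add _ _ _ (nodup_featKeys r0) hQmem]
    rw [PySem.Set.ofList_eq_self_of_nodup _ ((nodup_featKeys r0).filter _),
        PySem.Set.ofList_eq_self_of_nodup _ ((nodup_featKeys r0).filter _)]
    apply List.filter_congr
    intro k hk
    have hcnt : (featKeys r0 ++ List.flatMap featKeys rest).count k
        = 1 + (List.flatMap featKeys rest).count k := by
      rw [List.count_append, List.count_eq_one_of_mem (nodup_featKeys r0) hk]
    have hcf := count_flat rest k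
    rw [Bool.eq_iff_iff]
    simp only [Bool.and_eq_true, List.all_eq_true, decide_eq_true_iff, beq_iff_eq]
    constructor
    · rintro ⟨⟨h1, h2⟩, h3⟩
      refine ⟨⟨?_, h1⟩, h2⟩
      have h4 : (List.flatMap featKeys rest).count k = rest.length := hcf.2.2 h3
      omega
    · rintro ⟨⟨hc, h1⟩, h2⟩
      refine ⟨⟨h1, h2⟩, ?_⟩
      have h4 : (featKeys r0 ++ List.flatMap featKeys rest).count k = rest.length + 1 := by
        exact_mod_cast hc
      exact hcf.2.1 (by omega)
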